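-- pv_equiv track=rewrite | github.com/josealt2197/PP1 | Proyecto Josué y Jose/ProgramaPrincipal.py | cifrarCodigoTelefonico
-- ===== SOURCE A (Python) =====
-- def buscarCaracter(cadena, caracter):
--     indice = 0
--
--     while (indice != len(cadena)):
--         if (cadena[indice] == caracter):
--             return indice
--         indice += 1
--
--     return -1
--
-- def cifrarCodigoTelefonico(cadena):
--     cadena = cadena.lower()
--     cadenaCifrada = ""
--     indice = 0
--
--     while (indice != len(cadena)):
--         cadenaCifrada = cadenaCifrada + cifrarLetraCodigoTelefonico(cadena[indice])
--         indice += 1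
--
--     return cadenaCifrada
--
-- def cifrarLetraCodigoTelefonico(letra):
--     letraCifrada = ""
--     numeroAsignado = 1
--     bloque = ""
--     inicio = 0
--     fin = 3
--     letras = "abcdefghijklmnopqrstuvwxyz"
--
--     if (buscarCaracter(letras, letra) != -1):
--         while (inicio < 25):
--
--             bloque = letras[inicio:fin]
--
--             if (buscarCaracter(bloque, letra) == -1):
--                 if (numeroAsignado == 5 or numeroAsignado == 7):
--                     inicio += 3
--                     fin += 4
--                 elif (numeroAsignado == 6):
--                     inicio += 4
--                     fin += 3
--                 else:
--                     inicio += 3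
--                     fin += 3
--
--                 numeroAsignado += 1
--             else:
--                 return str(numeroAsignado + 1) + str(buscarCaracter(bloque, letra) + 1)
--
--     elif (letra == " "):
--         return "*"
--     else:
--         return letra
-- ===== SOURCE B (Python) =====
-- _TABLA = {
--     'a': '21', 'b': '22', 'c': '23',
--     'd': '31', 'e': '32', 'f': '33',
--     'g': '41', 'h': '42', 'i': '43',
--     'j': '51', 'k': '52', 'l': '53',
--     'm': '61', 'n': '62', 'o': '63',
--     'p': '71', 'q': '72', 'r': '73', 's': '74',
--     't': '81', 'u': '82', 'v': '83',
--     'w': '91', 'x': '92', 'y': '93', 'z': '94',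
--     ' ': '*',
-- }
--
-- def cifrarCodigoTelefonico(cadena):
--     return ''.join(_TABLA.get(c, c) for c in cadena.lower())
-- ===== Notes on version B (the rewrite author's own statement) =====
-- stated objective: simpler
-- what changed: Replaced the per-letter block-scanning while-loop (repeated slicing of the alphabet and linear buscarCaracter scans, plus quadratic string concatenation) by a single literal lookup table mapping each lowercase letter to its keypad code (and space to '*') joined in one pass.
import Mathlib
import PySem

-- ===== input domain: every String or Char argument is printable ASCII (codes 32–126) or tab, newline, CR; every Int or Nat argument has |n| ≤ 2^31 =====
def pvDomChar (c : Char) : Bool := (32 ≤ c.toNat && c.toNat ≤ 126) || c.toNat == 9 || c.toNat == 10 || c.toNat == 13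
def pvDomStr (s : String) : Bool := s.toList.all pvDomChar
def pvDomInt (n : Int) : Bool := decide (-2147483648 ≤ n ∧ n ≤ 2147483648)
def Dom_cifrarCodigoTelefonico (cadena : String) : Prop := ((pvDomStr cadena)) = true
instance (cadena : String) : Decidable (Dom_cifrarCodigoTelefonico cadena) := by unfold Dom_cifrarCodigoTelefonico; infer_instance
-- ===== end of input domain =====

-- B replaces A's per-letter block-scanning loop by a single literal lookup table (simpler).

-- ===== PORT A =====
-- buscarCaracter: linear scan by index
def pvBuscarGo (cs : List Char) (c : Char) (indice : Nat) : Int :=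
  if _h : indice < cs.length then
    if cs[indice] == c then (indice : Int)
    else pvBuscarGo cs c (indice + 1)
  else -1
termination_by cs.length - indice

def buscarCaracter (cs : List Char) (c : Char) : Int := pvBuscarGo cs c 0

-- letras = "abcdefghijklmnopqrstuvwxyz" (as its character list)
def pvLetras : List Char :=
  ['a','b','c','d','e','f','g','h','i','j','k','l','m','n','o','p','q','r','s','t','u','v','w','x','y','z']

-- the while-loop of cifrarLetraCodigoTelefonico; the `else []` branch (inicio ≥ 25 without a hit)
-- is unreachable for letters, matching Python's implicit fall-through
def pvCifrarLetraLoop (letra : Char) (numeroAsignado inicio fin : Int) : List Char :=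
  if _h : inicio < 25 then
    let bloque := PySem.List.slice pvLetras inicio fin
    if buscarCaracter bloque letra == -1 then
      if numeroAsignado == 5 || numeroAsignado == 7 then
        pvCifrarLetraLoop letra (numeroAsignado + 1) (inicio + 3) (fin + 4)
      else if numeroAsignado == 6 then
        pvCifrarLetraLoop letra (numeroAsignado + 1) (inicio + 4) (fin + 3)
      else
        pvCifrarLetraLoop letra (numeroAsignado + 1) (inicio + 3) (fin + 3)
    else
      PySem.Int.toChars (numeroAsignado + 1) ++ PySem.Int.toChars (buscarCaracter bloque letra + 1)
  else []
termination_by (25 - inicio).toNat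
decreasing_by all_goals omega

def cifrarLetraCodigoTelefonico (letra : Char) : List Char :=
  if buscarCaracter pvLetras letra != -1 then
    pvCifrarLetraLoop letra 1 0 3
  else if letra == ' ' then ['*']
  else [letra]

def cifrarCodigoTelefonico (cadena : String) : String :=
  String.ofList ((PySem.Chars.lower cadena.toList).foldl
    (fun acc c => acc ++ cifrarLetraCodigoTelefonico c) [])

-- ===== PORT B =====
def pvTabla : PySem.Dict Char (List Char) :=
  PySem.Dict.mk
  [('a', ['2','1']), ('b', ['2','2']), ('c', ['2','3']),
   ('d', ['3','1']), ('e', ['3','2']), ('f', ['3','3']),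
   ('g', ['4','1']), ('h', ['4','2']), ('i', ['4','3']),
   ('j', ['5','1']), ('k', ['5','2']), ('l', ['5','3']),
   ('m', ['6','1']), ('n', ['6','2']), ('o', ['6','3']),
   ('p', ['7','1']), ('q', ['7','2']), ('r', ['7','3']), ('s', ['7','4']),
   ('t', ['8','1']), ('u', ['8','2']), ('v', ['8','3']),
   ('w', ['9','1']), ('x', ['9','2']), ('y', ['9','3']), ('z', ['9','4']),
   (' ', ['*'])]

def cifrarCodigoTelefonico_alt (cadena : String) : String :=
  String.ofList (((PySem.Chars.lower cadena.toList).map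
    (fun c => PySem.Dict.getD pvTabla c [c])).flatten)

-- ===== PRECONDITION & SPEC =====
def Spec_cifrarCodigoTelefonico (cadena : String) (out : String) : Prop := out = cifrarCodigoTelefonico_alt cadena
instance (cadena : String) (out : String) : Decidable (Spec_cifrarCodigoTelefonico cadena out) := by unfold Spec_cifrarCodigoTelefonico; infer_instance

-- ===== CLAIM (what is proved, stated in full; the proofs are below) =====
def Claim_equal_cifrarCodigoTelefonico : Prop := ∀ (cadena : String), Dom_cifrarCodigoTelefonico cadena → Spec_cifrarCodigoTelefonico cadena (cifrarCodigoTelefonico cadena)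

-- ===== LEMMAS AND PROOFS =====
lemma pvBuscarGo_of_not_mem (cs : List Char) (c : Char) (h : c ∉ cs) (i : Nat) :
    pvBuscarGo cs c i = -1 := by
  fun_induction pvBuscarGo cs c i
  all_goals simp_all [beq_iff_eq]
  rename_i i hi hc
  exact h (hc ▸ List.getElem_mem hi)

lemma letra_eq (c : Char) :
    cifrarLetraCodigoTelefonico c = PySem.Dict.getD pvTabla c [c] := by
  by_cases hm : c ∈ pvLetras
  · fin_cases hm <;>
      simp [cifrarLetraCodigoTelefonico, pvCifrarLetraLoop, buscarCaracter, pvBuscarGo,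
        pvLetras, pvTabla, PySem.List.slice, PySem.Int.toChars, PySem.Dict.getD,
        PySem.Dict.get?] <;> decide
  · by_cases hs : c = ' '
    · subst hs
      simp [cifrarLetraCodigoTelefonico, buscarCaracter, pvBuscarGo, pvLetras, pvTabla,
        PySem.Dict.getD, PySem.Dict.get?]
    · have hneq : buscarCaracter pvLetras c = -1 :=
        pvBuscarGo_of_not_mem pvLetras c hm 0
      have hm' : 'a' ≠ c ∧ 'b' ≠ c ∧ 'c' ≠ c ∧ 'd' ≠ c ∧ 'e' ≠ c ∧ 'f' ≠ c ∧ 'g' ≠ c ∧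
          'h' ≠ c ∧ 'i' ≠ c ∧ 'j' ≠ c ∧ 'k' ≠ c ∧ 'l' ≠ c ∧ 'm' ≠ c ∧ 'n' ≠ c ∧ 'o' ≠ c ∧
          'p' ≠ c ∧ 'q' ≠ c ∧ 'r' ≠ c ∧ 's' ≠ c ∧ 't' ≠ c ∧ 'u' ≠ c ∧ 'v' ≠ c ∧ 'w' ≠ c ∧
          'x' ≠ c ∧ 'y' ≠ c ∧ 'z' ≠ c := by
        simpa [pvLetras, eq_comm] using hm
      have hs' : ' ' ≠ c := fun h => hs h.symm
      obtain ⟨h1,h2,h3,h4,h5,h6,h7,h8,h9,h10,h11,h12,h13,h14,h15,h16,h17,h18,h19,h20,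
        h21,h22,h23,h24,h25,h26⟩ := hm'
      have e1 : ('a' == c) = false := beq_eq_false_iff_ne.mpr h1
      have e2 : ('b' == c) = false := beq_eq_false_iff_ne.mpr h2
      have e3 : ('c' == c) = false := beq_eq_false_iff_ne.mpr h3
      have e4 : ('d' == c) = false := beq_eq_false_iff_ne.mpr h4
      have e5 : ('e' == c) = false := beq_eq_false_iff_ne.mpr h5
      have e6 : ('f' == c) = false := beq_eq_false_iff_ne.mpr h6
      have e7 : ('g' == c) = false := beq_eq_false_iff_ne.mpr h7
      have e8 : ('h' == c) = false := beq_eq_false_iff_ne.mpr h8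
      have e9 : ('i' == c) = false := beq_eq_false_iff_ne.mpr h9
      have e10 : ('j' == c) = false := beq_eq_false_iff_ne.mpr h10
      have e11 : ('k' == c) = false := beq_eq_false_iff_ne.mpr h11
      have e12 : ('l' == c) = false := beq_eq_false_iff_ne.mpr h12
      have e13 : ('m' == c) = false := beq_eq_false_iff_ne.mpr h13
      have e14 : ('n' == c) = false := beq_eq_false_iff_ne.mpr h14
      have e15 : ('o' == c) = false := beq_eq_false_iff_ne.mpr h15
      have e16 : ('p' == c) = false := beq_eq_false_iff_ne.mpr h16
      have e17 : ('q' == c) = false := beq_eq_false_iff_ne.mpr h17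
      have e18 : ('r' == c) = false := beq_eq_false_iff_ne.mpr h18
      have e19 : ('s' == c) = false := beq_eq_false_iff_ne.mpr h19
      have e20 : ('t' == c) = false := beq_eq_false_iff_ne.mpr h20
      have e21 : ('u' == c) = false := beq_eq_false_iff_ne.mpr h21
      have e22 : ('v' == c) = false := beq_eq_false_iff_ne.mpr h22
      have e23 : ('w' == c) = false := beq_eq_false_iff_ne.mpr h23
      have e24 : ('x' == c) = false := beq_eq_false_iff_ne.mpr h24
      have e25 : ('y' == c) = false := beq_eq_false_iff_ne.mpr h25
      have e26 : ('z' == c) = false := beq_eq_false_iff_ne.mpr h26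
      have e27 : (' ' == c) = false := beq_eq_false_iff_ne.mpr hs'
      simp [cifrarLetraCodigoTelefonico, hneq, hs, pvTabla, PySem.Dict.getD, PySem.Dict.get?,
        List.find?, e1,e2,e3,e4,e5,e6,e7,e8,e9,e10,e11,e12,e13,e14,e15,e16,e17,e18,e19,e20,
        e21,e22,e23,e24,e25,e26,e27]

-- ===== VERDICT (by name: the statement is the Claim_ definition above) =====
theorem cifrarCodigoTelefonico_spec : Claim_equal_cifrarCodigoTelefonico := by
  intro cadena _
  unfold Spec_cifrarCodigoTelefonico cifrarCodigoTelefonico cifrarCodigoTelefonico_alt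
  rw [PySem.List.foldl_append_eq_flatMap]
  rw [List.flatMap_def]
  simp only [List.nil_append]
  exact congrArg (fun l => String.ofList l.flatten) (List.map_congr_left (fun c _ => letra_eq c))
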